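-- pv_equiv track=rewrite | github.com/AWAIS-ma/clinipaws | Logistic Regression classifier/Logistic_Regression.py | check_rule_based_overrides
-- ===== SOURCE A (Python) =====
-- def check_rule_based_overrides(symptoms):
--     """
--     Checks for specific symptom combinations and returns a hardcoded disease prediction.
--     Useful for correcting model biases or ensuring accuracy for distinct clinical signs.
--     """
--     # Normalize symptoms: lowercase and strip
--     symptoms = [s.lower().strip() for s in symptoms if s]
--     symptoms_text = " ".join(symptoms)
--
--     # Rule 1: Lumpy Skin Disease (LSD)
--     # Key signs: Painless lumps, Lesions on skin, Skin nodules
--     if "painless lumps" in symptoms_text and ("lesions on skin" in symptoms_text or "skin nodules" in symptoms_text):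
--         return "Lumpy Skin Disease"
--
--     if "skin nodules" in symptoms_text and "fever" in symptoms_text:
--         return "Lumpy Skin Disease"
--
--     # Rule 2: Blackleg
--     # Key signs: Swelling in limb/muscle, Crackling sound (crepitus), Lameness
--     if "crackling sound" in symptoms_text or "crepitation" in symptoms_text:
--         return "Blackleg"
--
--     if "swelling in limb" in symptoms_text and "lameness" in symptoms_text:
--         return "Blackleg"
--
--     # Rule 3: Foot and Mouth Disease (FMD)
--     # Key signs: Blisters on mouth/tongue/hooves, Salivation
--     if "blisters" in symptoms_text or "vesicles" in symptoms_text: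
--         return "Foot and Mouth Disease"
--
--     if "sores on mouth" in symptoms_text or "sores on hooves" in symptoms_text:
--         return "Foot and Mouth Disease"
--
--     # Rule 4: Pneumonia
--     # Key signs: Coughing, Nasal discharge, Difficulty breathing, Rapid breathing
--     if "coughing" in symptoms_text and "nasal discharge" in symptoms_text:
--         return "Pneumonia"
--
--     if "coughing" in symptoms_text and ("difficult breathing" in symptoms_text or "rapid breathing" in symptoms_text):
--         return "Pneumonia"
--
--     return None
-- ===== SOURCE B (Python) =====
-- KEYWORDS = ["painless lumps", "lesions on skin", "skin nodules", "fever",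
--             "crackling sound", "crepitation", "swelling in limb", "lameness",
--             "blisters", "vesicles", "sores on mouth", "sores on hooves",
--             "coughing", "nasal discharge", "difficult breathing", "rapid breathing"]
--
-- RULES = [
--     ([["painless lumps"], ["lesions on skin", "skin nodules"]], "Lumpy Skin Disease"),
--     ([["skin nodules"], ["fever"]], "Lumpy Skin Disease"),
--     ([["crackling sound", "crepitation"]], "Blackleg"),
--     ([["swelling in limb"], ["lameness"]], "Blackleg"),
--     ([["blisters", "vesicles"]], "Foot and Mouth Disease"),
--     ([["sores on mouth", "sores on hooves"]], "Foot and Mouth Disease"),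
--     ([["coughing"], ["nasal discharge"]], "Pneumonia"),
--     ([["coughing"], ["difficult breathing", "rapid breathing"]], "Pneumonia"),
-- ]
--
-- def check_rule_based_overrides(symptoms):
--     # Stage 1: one positional sweep over the normalized text collects the set of
--     # keywords that occur anywhere in it (multi-pattern match by start position).
--     text = " ".join(s.lower().strip() for s in symptoms if s)
--     found = set()
--     for i in range(len(text)):
--         for kw in KEYWORDS:
--             if text.startswith(kw, i):
--                 found.add(kw)
--     # Stage 2: first rule whose AND-of-OR groups are all met by the found set wins.
--     for groups, disease in RULES:
--         if all(any(kw in found for kw in group) for group in groups):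
--             return disease
--     return None
-- ===== Notes on version B (the rewrite author's own statement) =====
-- stated objective: alternative
-- what changed: Replaces A's hardcoded if-chain of repeated substring searches by a two-stage algorithm: a single positional sweep over the normalized text that collects the set of matched keywords via startswith at each index, followed by a scan of an ordered declarative rules table against that set.
import Mathlib
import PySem

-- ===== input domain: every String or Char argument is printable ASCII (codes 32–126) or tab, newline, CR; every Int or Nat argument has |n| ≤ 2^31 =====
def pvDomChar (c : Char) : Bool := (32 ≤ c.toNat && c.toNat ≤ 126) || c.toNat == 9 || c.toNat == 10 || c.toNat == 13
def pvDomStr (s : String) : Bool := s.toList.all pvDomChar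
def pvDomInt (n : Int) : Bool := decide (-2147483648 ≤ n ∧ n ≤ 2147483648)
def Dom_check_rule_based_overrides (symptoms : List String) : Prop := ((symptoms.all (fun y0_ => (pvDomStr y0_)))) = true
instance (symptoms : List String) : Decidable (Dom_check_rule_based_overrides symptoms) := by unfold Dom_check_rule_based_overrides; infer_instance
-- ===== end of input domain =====

-- B replaces A's repeated substring tests inside a hardcoded if-chain by a two-stage
-- algorithm: one positional sweep over the text collects the set of matched keywords,
-- then an ordered rules table is scanned against that set (objective: alternative).

-- ===== PORT A =====
def check_rule_based_overrides (symptoms : List String) : Option String :=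
  let syms := (symptoms.filter (fun s => s != "")).map (fun s => PySem.Str.strip (PySem.Str.lower s))
  let text := PySem.Str.join " " syms
  if PySem.Str.isIn "painless lumps" text &&
       (PySem.Str.isIn "lesions on skin" text || PySem.Str.isIn "skin nodules" text) then
    some "Lumpy Skin Disease"
  else if PySem.Str.isIn "skin nodules" text && PySem.Str.isIn "fever" text then
    some "Lumpy Skin Disease"
  else if PySem.Str.isIn "crackling sound" text || PySem.Str.isIn "crepitation" text then
    some "Blackleg"
  else if PySem.Str.isIn "swelling in limb" text && PySem.Str.isIn "lameness" text then
    some "Blackleg"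
  else if PySem.Str.isIn "blisters" text || PySem.Str.isIn "vesicles" text then
    some "Foot and Mouth Disease"
  else if PySem.Str.isIn "sores on mouth" text || PySem.Str.isIn "sores on hooves" text then
    some "Foot and Mouth Disease"
  else if PySem.Str.isIn "coughing" text && PySem.Str.isIn "nasal discharge" text then
    some "Pneumonia"
  else if PySem.Str.isIn "coughing" text &&
       (PySem.Str.isIn "difficult breathing" text || PySem.Str.isIn "rapid breathing" text) then
    some "Pneumonia"
  else none

-- ===== PORT B =====
def pvKeywords : List String :=
  ["painless lumps", "lesions on skin", "skin nodules", "fever",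
   "crackling sound", "crepitation", "swelling in limb", "lameness",
   "blisters", "vesicles", "sores on mouth", "sores on hooves",
   "coughing", "nasal discharge", "difficult breathing", "rapid breathing"]

def pvRules : List (List (List String) × String) :=
  [ ([["painless lumps"], ["lesions on skin", "skin nodules"]], "Lumpy Skin Disease"),
    ([["skin nodules"], ["fever"]], "Lumpy Skin Disease"),
    ([["crackling sound", "crepitation"]], "Blackleg"),
    ([["swelling in limb"], ["lameness"]], "Blackleg"),
    ([["blisters", "vesicles"]], "Foot and Mouth Disease"),
    ([["sores on mouth", "sores on hooves"]], "Foot and Mouth Disease"),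
    ([["coughing"], ["nasal discharge"]], "Pneumonia"),
    ([["coughing"], ["difficult breathing", "rapid breathing"]], "Pneumonia") ]

-- stage 1: 'for i in range(len(text)): for kw in KEYWORDS: if text.startswith(kw, i): found.add(kw)'
-- text.startswith(kw, i) with 0 ≤ i ≤ len(text) is exactly: kw.toList is a prefix of text.toList.drop i
def pvScan (cs : List Char) : PySem.Set String :=
  (List.range cs.length).foldl
    (fun found i =>
      pvKeywords.foldl
        (fun found kw =>
          if PySem.Chars.startswith (cs.drop i) kw.toList then PySem.Set.add found kw else found)
        found)
    PySem.Set.empty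

-- stage 2: 'for groups, disease in RULES' with its early return
def pvRuleLoop (found : PySem.Set String) : List (List (List String) × String) → Option String
  | [] => none
  | (groups, disease) :: rest =>
      if groups.all (fun group => group.any (fun kw => PySem.Set.contains found kw)) then
        some disease
      else pvRuleLoop found rest

def check_rule_based_overrides_alt (symptoms : List String) : Option String :=
  let syms := (symptoms.filter (fun s => s != "")).map (fun s => PySem.Str.strip (PySem.Str.lower s))
  let text := PySem.Str.join " " syms
  pvRuleLoop (pvScan text.toList) pvRules

-- ===== PRECONDITION & SPEC =====
def Spec_check_rule_based_overrides (symptoms : List String) (out : Option String) : Prop := out = check_rule_based_overrides_alt symptoms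
instance (symptoms : List String) (out : Option String) : Decidable (Spec_check_rule_based_overrides symptoms out) := by unfold Spec_check_rule_based_overrides; infer_instance

-- ===== CLAIM (what is proved, stated in full; the proofs are below) =====
def Claim_equal_check_rule_based_overrides : Prop := ∀ (symptoms : List String), Dom_check_rule_based_overrides symptoms → Spec_check_rule_based_overrides symptoms (check_rule_based_overrides symptoms)

-- ===== LEMMAS AND PROOFS =====

-- membership after the inner keyword fold at one position
theorem pvScan_inner_mem (cs : List Char) (i : Nat) (kw : String) :
    ∀ (ks : List String) (found : PySem.Set String),
      kw ∈ ks.foldl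
        (fun found kw =>
          if PySem.Chars.startswith (cs.drop i) kw.toList then PySem.Set.add found kw else found)
        found ↔
      kw ∈ found ∨ (kw ∈ ks ∧ PySem.Chars.startswith (cs.drop i) kw.toList = true) := by
  intro ks
  induction ks with
  | nil => intro found; simp
  | cons k ks ih =>
    intro found
    simp only [List.foldl_cons, ih, List.mem_cons]
    by_cases h : PySem.Chars.startswith (cs.drop i) k.toList = true
    · rw [if_pos h]
      simp only [PySem.Set.mem_add]
      constructor
      · rintro ((hf | rfl) | ⟨hk, hs⟩)
        · exact Or.inl hf
        · exact Or.inr ⟨Or.inl rfl, h⟩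
        · exact Or.inr ⟨Or.inr hk, hs⟩
      · rintro (hf | ⟨(rfl | hk), hs⟩)
        · exact Or.inl (Or.inl hf)
        · exact Or.inl (Or.inr rfl)
        · exact Or.inr ⟨hk, hs⟩
    · rw [if_neg h]
      constructor
      · rintro (hf | ⟨hk, hs⟩)
        · exact Or.inl hf
        · exact Or.inr ⟨Or.inr hk, hs⟩
      · rintro (hf | ⟨(rfl | hk), hs⟩)
        · exact Or.inl hf
        · exact absurd hs h
        · exact Or.inr ⟨hk, hs⟩

-- membership after the outer position fold
theorem pvScan_outer_mem (cs : List Char) (kw : String) :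
    ∀ (is_ : List Nat) (found : PySem.Set String),
      kw ∈ is_.foldl
        (fun found i =>
          pvKeywords.foldl
            (fun found kw =>
              if PySem.Chars.startswith (cs.drop i) kw.toList then PySem.Set.add found kw else found)
            found)
        found ↔
      kw ∈ found ∨ ∃ i ∈ is_, kw ∈ pvKeywords ∧ PySem.Chars.startswith (cs.drop i) kw.toList = true := by
  intro is_
  induction is_ with
  | nil => intro found; simp
  | cons j js ih =>
    intro found
    simp only [List.foldl_cons, ih, pvScan_inner_mem, List.mem_cons]
    constructor
    · rintro ((hf | ⟨hk, hs⟩) | ⟨i, hi, h⟩)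
      · exact Or.inl hf
      · exact Or.inr ⟨j, Or.inl rfl, hk, hs⟩
      · exact Or.inr ⟨i, Or.inr hi, h⟩
    · rintro (hf | ⟨i, (rfl | hi), h⟩)
      · exact Or.inl (Or.inl hf)
      · exact Or.inl (Or.inr h)
      · exact Or.inr ⟨i, hi, h⟩

-- a nonempty keyword is in the scanned set iff it occurs in the text
theorem pvScan_contains (cs : List Char) (kw : String)
    (h1 : kw ∈ pvKeywords) (h2 : kw.toList ≠ []) :
    PySem.Set.contains (pvScan cs) kw = PySem.Chars.isIn kw.toList cs := by
  have hmem : kw ∈ pvScan cs ↔ PySem.Chars.isIn kw.toList cs = true := by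
    rw [pvScan, pvScan_outer_mem]
    simp only [PySem.Set.empty, List.not_mem_nil, false_or, List.mem_range]
    rw [← PySem.Chars.exists_prefix_drop_iff_isIn]
    constructor
    · rintro ⟨i, _, _, hs⟩
      exact ⟨i, (PySem.Chars.startswith_iff _ _).mp hs⟩
    · rintro ⟨j, hp⟩
      by_cases hj : j < cs.length
      · exact ⟨j, hj, h1, (PySem.Chars.startswith_iff _ _).mpr hp⟩
      · exfalso
        rw [List.drop_eq_nil_of_le (by omega)] at hp
        exact h2 (List.prefix_nil.mp hp)
  rw [Bool.eq_iff_iff]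
  rw [show PySem.Set.contains (pvScan cs) kw = List.contains (pvScan cs) kw from rfl]
  rw [List.contains_iff_mem]
  exact hmem

theorem pvRuleLoop_eq_chain (text : String) :
    pvRuleLoop (pvScan text.toList) pvRules =
      (if PySem.Str.isIn "painless lumps" text &&
           (PySem.Str.isIn "lesions on skin" text || PySem.Str.isIn "skin nodules" text) then
        some "Lumpy Skin Disease"
      else if PySem.Str.isIn "skin nodules" text && PySem.Str.isIn "fever" text then
        some "Lumpy Skin Disease"
      else if PySem.Str.isIn "crackling sound" text || PySem.Str.isIn "crepitation" text then
        some "Blackleg"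
      else if PySem.Str.isIn "swelling in limb" text && PySem.Str.isIn "lameness" text then
        some "Blackleg"
      else if PySem.Str.isIn "blisters" text || PySem.Str.isIn "vesicles" text then
        some "Foot and Mouth Disease"
      else if PySem.Str.isIn "sores on mouth" text || PySem.Str.isIn "sores on hooves" text then
        some "Foot and Mouth Disease"
      else if PySem.Str.isIn "coughing" text && PySem.Str.isIn "nasal discharge" text then
        some "Pneumonia"
      else if PySem.Str.isIn "coughing" text &&
           (PySem.Str.isIn "difficult breathing" text || PySem.Str.isIn "rapid breathing" text) then
        some "Pneumonia"
      else none) := by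
  have h := fun kw h1 h2 => pvScan_contains text.toList kw h1 h2
  simp only [pvRules, pvRuleLoop, List.all_cons, List.all_nil, List.any_cons, List.any_nil,
    Bool.and_true, Bool.or_false,
    h "painless lumps" (by decide) (by decide),
    h "lesions on skin" (by decide) (by decide),
    h "skin nodules" (by decide) (by decide),
    h "fever" (by decide) (by decide),
    h "crackling sound" (by decide) (by decide),
    h "crepitation" (by decide) (by decide),
    h "swelling in limb" (by decide) (by decide),
    h "lameness" (by decide) (by decide),
    h "blisters" (by decide) (by decide),
    h "vesicles" (by decide) (by decide),
    h "sores on mouth" (by decide) (by decide),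
    h "sores on hooves" (by decide) (by decide),
    h "coughing" (by decide) (by decide),
    h "nasal discharge" (by decide) (by decide),
    h "difficult breathing" (by decide) (by decide),
    h "rapid breathing" (by decide) (by decide),
    PySem.Str.isIn_eq]
  rfl

-- ===== VERDICT =====
theorem check_rule_based_overrides_spec : Claim_equal_check_rule_based_overrides := by
  intro symptoms _
  unfold Spec_check_rule_based_overrides check_rule_based_overrides check_rule_based_overrides_alt
  exact (pvRuleLoop_eq_chain _).symm
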